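-- pv_equiv track=rewrite | github.com/satoshikawato/gbdraw | gbdraw/data_processing.py | find_lowest_available_track
-- ===== SOURCE A (Python) =====
-- def check_label_overlap(label1, label2):
--    """Check if two labels overlap horizontally"""
--    return not (label1["end"] < label2["start"] or label2["end"] < label1["start"])
--
-- def find_lowest_available_track(track_dict, label):
--    """Find the lowest track (closest to track_1) where the label can be placed without overlap"""
--    track_num = 1
--    while True:
--        track_id = f"track_{track_num}"
--        # Check if this track has overlaps
--        has_overlap = False
--        if track_id in track_dict:
--            for existing_label in track_dict[track_id]:
--                if check_label_overlap(label, existing_label):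
--                    has_overlap = True
--                    break
--
--        if not has_overlap:
--            return track_num
--        track_num += 1
-- ===== SOURCE B (Python) =====
-- def check_label_overlap(label1, label2):
--     """Check if two labels overlap horizontally"""
--     return not (label1["end"] < label2["start"] or label2["end"] < label1["start"])
--
--
-- def _is_numbered_track(key):
--     return key.startswith("track_") and key[6:].isdigit()
--
--
-- def find_lowest_available_track(track_dict, label):
--     """Collect the keys of numbered tracks whose existing labels clash with the
--     new label, then probe candidate track names upward for the first free one."""
--     blocked = {key for key, labels in track_dict.items()
--                if _is_numbered_track(key)
--                and any(check_label_overlap(label, lab) for lab in labels)}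
--     n = 1
--     while f"track_{n}" in blocked:
--         n += 1
--     return n
-- ===== Notes on version B (the rewrite author's own statement) =====
-- stated objective: alternative
-- what changed: Replaces A's lazy upward scan (look up track_1, track_2, ... and stop at the first without overlap) by a staged computation: one comprehension over the dict's items collects the KEYS of numbered tracks whose labels clash into a set, then a scan probes candidate key strings track_1, track_2, ... until one is not in that set; no per-candidate dict lookup remains.
-- outside the precondition, e.g. on find_lowest_available_track({'track_2': [{'x': 0}]}, {'start': 0, 'end': 1}): A returns 1, B raises KeyError
import Mathlib
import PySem

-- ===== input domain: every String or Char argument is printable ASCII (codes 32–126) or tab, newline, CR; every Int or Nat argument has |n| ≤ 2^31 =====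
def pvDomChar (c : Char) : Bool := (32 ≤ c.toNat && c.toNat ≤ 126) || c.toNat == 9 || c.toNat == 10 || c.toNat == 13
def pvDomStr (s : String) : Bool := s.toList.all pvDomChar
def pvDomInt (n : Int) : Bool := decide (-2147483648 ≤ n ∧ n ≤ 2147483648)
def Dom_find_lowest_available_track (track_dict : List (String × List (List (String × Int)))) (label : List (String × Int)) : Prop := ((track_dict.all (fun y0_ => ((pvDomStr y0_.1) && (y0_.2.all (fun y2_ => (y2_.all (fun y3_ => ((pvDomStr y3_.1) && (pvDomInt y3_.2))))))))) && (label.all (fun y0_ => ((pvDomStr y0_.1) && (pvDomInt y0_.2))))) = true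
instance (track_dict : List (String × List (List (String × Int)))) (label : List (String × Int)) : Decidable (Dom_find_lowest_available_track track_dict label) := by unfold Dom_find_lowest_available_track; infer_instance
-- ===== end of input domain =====

-- B replaces A's lazy upward scan (look up track_1, track_2, … until one is free) by a
-- staged computation: collect the KEYS of numbered tracks whose labels clash into a set,
-- then probe candidate key strings upward (objective: alternative decomposition).

-- ===== PORT A =====
-- module helper shared by both Pythons: check_label_overlap (none = KeyError on a missing
-- "start"/"end" key; Python's `or` short-circuit is kept)
def pv_check_label_overlap? (label1 label2 : List (String × Int)) : Option Bool :=
  match (PySem.Dict.mk label1).get? "end", (PySem.Dict.mk label2).get? "start" with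
  | some e1, some s2 =>
    if e1 < s2 then some false
    else
      match (PySem.Dict.mk label2).get? "end", (PySem.Dict.mk label1).get? "start" with
      | some e2, some s1 => some (!(e2 < s1))
      | _, _ => none
  | _, _ => none

-- A's inner `for existing_label in …: if overlap: has_overlap = True; break`
def pvAnyOverlapA? (label : List (String × Int)) : List (List (String × Int)) → Option Bool
  | [] => some false
  | l :: ls =>
    match pv_check_label_overlap? label l with
    | none => none
    | some true => some true
    | some false => pvAnyOverlapA? label ls

-- A's `while True` loop, with fuel; fuel td.length+1 always suffices (proved below:
-- among track_1 .. track_{len+1} at least one is free), so the `none` branch is unreachable.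
def pvLoopA (td : List (String × List (List (String × Int)))) (label : List (String × Int)) :
    Nat → Int → Option Int
  | 0, _ => none
  | fuel + 1, track_num =>
    match (match (PySem.Dict.mk td).get? ("track_" ++ PySem.Int.toStr track_num) with
           | none => some false
           | some labs => pvAnyOverlapA? label labs) with
    | none => none
    | some false => some track_num
    | some true => pvLoopA td label fuel (track_num + 1)

def find_lowest_available_track (track_dict : List (String × List (List (String × Int)))) (label : List (String × Int)) : Int :=
  (pvLoopA track_dict label (track_dict.length + 1) 1).getD 0

-- ===== PORT B =====
-- B's helper `_is_numbered_track(key)`: key.startswith("track_") and key[6:].isdigit()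
def pvIsNumberedTrack (key : String) : Bool :=
  PySem.Str.startswith key "track_" && PySem.Str.strIsdigit (PySem.Str.slice key (some 6) none)

-- B's `any(check_label_overlap(label, lab) for lab in labels)` (short-circuit kept:
-- once the accumulator is true no further label is inspected)
def pvClash? (label : List (String × Int)) (ls : List (List (String × Int))) : Option Bool :=
  ls.foldlM (fun acc l => if acc then some true else pv_check_label_overlap? label l) false

-- `track_dict.items()` under the association-list dict convention (first match wins):
-- the first occurrence of each key, in insertion order
def pvDictItems (td : List (String × List (List (String × Int)))) :
    List (String × List (List (String × Int))) :=
  td.foldl (fun acc kv => if acc.any (fun p => p.1 == kv.1) then acc else acc ++ [kv]) []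

-- B's set comprehension: the keys of numbered tracks whose labels clash
def pvBlockedKeys? (td : List (String × List (List (String × Int)))) (label : List (String × Int)) :
    Option (PySem.Set String) :=
  (pvDictItems td).foldlM
    (fun s kv =>
      if pvIsNumberedTrack kv.1 then
        match pvClash? label kv.2 with
        | none => none
        | some b => some (if b then PySem.Set.add s kv.1 else s)
      else some s)
    PySem.Set.empty

-- B's `while f"track_{n}" in blocked: n += 1`; fuel blocked.length+1 always suffices
-- (blocked holds distinct keys and the probed keys are pairwise distinct), never exhausted.
def pvScanB (blocked : PySem.Set String) : Nat → Int → Int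
  | 0, n => n
  | fuel + 1, n =>
    if PySem.Set.contains blocked ("track_" ++ PySem.Int.toStr n) then pvScanB blocked fuel (n + 1)
    else n

def find_lowest_available_track_alt (track_dict : List (String × List (List (String × Int)))) (label : List (String × Int)) : Int :=
  match pvBlockedKeys? track_dict label with
  | some blocked => pvScanB blocked (blocked.length + 1) 1
  | none => 0

-- ===== PRECONDITION & SPEC =====
def pvGoodLabel (l : List (String × Int)) : Prop :=
  ((PySem.Dict.mk l).get? "start").isSome = true ∧ ((PySem.Dict.mk l).get? "end").isSome = true

-- Pre_ excludes inputs where some label involved lacks a "start"/"end" key: there A either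
-- raises KeyError itself, or returns while B raises KeyError because B inspects every
-- numbered track up front, not only the tracks below A's stopping point.
def Pre_find_lowest_available_track (track_dict : List (String × List (List (String × Int)))) (label : List (String × Int)) : Prop :=
  (pvGoodLabel label ∧
    ∀ kv ∈ track_dict, pvIsNumberedTrack kv.1 = true → ∀ lab ∈ kv.2, pvGoodLabel lab)
  ∨ (∀ kv ∈ track_dict, pvIsNumberedTrack kv.1 = true → kv.2 = [])

instance (track_dict : List (String × List (List (String × Int)))) (label : List (String × Int)) : Decidable (Pre_find_lowest_available_track track_dict label) := by
  unfold Pre_find_lowest_available_track pvGoodLabel; infer_instance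

def pvWitness_find_lowest_available_track : (List (String × List (List (String × Int)))) × (List (String × Int)) :=
  ([("track_1", [[("start", 0), ("end", 5)]])], [("start", 3), ("end", 7)])

def Spec_find_lowest_available_track (track_dict : List (String × List (List (String × Int)))) (label : List (String × Int)) (out : Int) : Prop := out = find_lowest_available_track_alt track_dict label
instance (track_dict : List (String × List (List (String × Int)))) (label : List (String × Int)) (out : Int) : Decidable (Spec_find_lowest_available_track track_dict label out) := by unfold Spec_find_lowest_available_track; infer_instance

-- ===== CLAIM (what is proved, stated in full; the proofs are below) =====
def Claim_equal_find_lowest_available_track : Prop := ∀ (track_dict : List (String × List (List (String × Int)))) (label : List (String × Int)), Dom_find_lowest_available_track track_dict label → Pre_find_lowest_available_track track_dict label → Spec_find_lowest_available_track track_dict label (find_lowest_available_track track_dict label)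

-- ===== LEMMAS AND PROOFS =====

-- pure (exception-free) counterparts, used only in the proofs
def pvKey (n : Int) : String := "track_" ++ PySem.Int.toStr n

def pvOv (l1 l2 : List (String × Int)) : Bool :=
  !((PySem.Dict.mk l1).getD "end" 0 < (PySem.Dict.mk l2).getD "start" 0
    || (PySem.Dict.mk l2).getD "end" 0 < (PySem.Dict.mk l1).getD "start" 0)

def pvStep (td : List (String × List (List (String × Int)))) (label : List (String × Int)) (n : Int) : Bool :=
  ((PySem.Dict.mk td).getD (pvKey n) []).any (fun l => pvOv label l)

def pvBlockedPure (td : List (String × List (List (String × Int)))) (label : List (String × Int)) : PySem.Set String :=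
  (pvDictItems td).foldl
    (fun s kv => if pvIsNumberedTrack kv.1 && kv.2.any (fun l => pvOv label l)
                 then PySem.Set.add s kv.1 else s)
    PySem.Set.empty

def pvW (td : List (String × List (List (String × Int)))) (label : List (String × Int)) : Prop :=
  pvGoodLabel label ∧ ∀ kv ∈ td, pvIsNumberedTrack kv.1 = true → ∀ lab ∈ kv.2, pvGoodLabel lab

theorem pvOv_some (a b : List (String × Int)) (ha : pvGoodLabel a) (hb : pvGoodLabel b) :
    pv_check_label_overlap? a b = some (pvOv a b) := by
  obtain ⟨ea, hea⟩ := Option.isSome_iff_exists.mp ha.2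
  obtain ⟨sa, hsa⟩ := Option.isSome_iff_exists.mp ha.1
  obtain ⟨eb, heb⟩ := Option.isSome_iff_exists.mp hb.2
  obtain ⟨sb, hsb⟩ := Option.isSome_iff_exists.mp hb.1
  simp only [pv_check_label_overlap?, pvOv, PySem.Dict.getD, hea, hsa, heb, hsb,
    Option.getD_some]
  by_cases hlt : ea < sb
  · simp [hlt]
  · simp [hlt]

-- injectivity of str(n) for positive n, and its digits are digits
theorem pvDigitChar_inj : ∀ a < 10, ∀ b < 10, Nat.digitChar a = Nat.digitChar b → a = b := by
  decide

theorem pvCore_append (f : Nat) : ∀ (n : Nat) (ds : List Char),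
    Nat.toDigitsCore 10 f n ds = Nat.toDigitsCore 10 f n [] ++ ds := by
  induction f with
  | zero => intro n ds; simp [Nat.toDigitsCore]
  | succ f ih =>
    intro n ds
    simp only [Nat.toDigitsCore]
    by_cases h : n / 10 = 0
    · simp [h]
    · simp only [h, if_false]
      rw [ih (n/10) (Nat.digitChar (n % 10) :: ds), ih (n/10) [Nat.digitChar (n % 10)]]
      simp

theorem pvCore_fuel : ∀ (f f' n : Nat) (ds : List Char), n < f → n < f' →
    Nat.toDigitsCore 10 f n ds = Nat.toDigitsCore 10 f' n ds := by
  intro f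
  induction f with
  | zero => intro f' n ds h; omega
  | succ f ih =>
    intro f' n ds h h'
    match f', h' with
    | f' + 1, h' =>
      simp only [Nat.toDigitsCore]
      by_cases h0 : n / 10 = 0
      · simp [h0]
      · simp only [h0]
        exact ih f' (n/10) _ (by omega) (by omega)

theorem pvToDigits_rec (n : Nat) :
    Nat.toDigits 10 n = if n < 10 then [Nat.digitChar n]
      else Nat.toDigits 10 (n / 10) ++ [Nat.digitChar (n % 10)] := by
  by_cases h : n < 10
  · have h0 : n / 10 = 0 := Nat.div_eq_of_lt h
    unfold Nat.toDigits
    rw [Nat.toDigitsCore.eq_def]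
    simp [h0, h, Nat.mod_eq_of_lt h]
  · have h0 : n / 10 ≠ 0 := by omega
    rw [if_neg h]
    unfold Nat.toDigits
    rw [Nat.toDigitsCore.eq_def]
    simp only [h0, if_false]
    rw [pvCore_fuel n (n/10 + 1) (n/10) _ (by omega) (by omega)]
    exact pvCore_append _ _ _

theorem pvToDigits_ne_nil (n : Nat) : Nat.toDigits 10 n ≠ [] := by
  rw [pvToDigits_rec]
  by_cases h : n < 10 <;> simp [h]

theorem pvToDigits_inj : ∀ n m : Nat, Nat.toDigits 10 n = Nat.toDigits 10 m → n = m := by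
  intro n
  induction n using Nat.strong_induction_on with
  | _ n ih =>
    intro m h
    rw [pvToDigits_rec n, pvToDigits_rec m] at h
    by_cases hn : n < 10 <;> by_cases hm : m < 10
    · simp only [hn, hm, if_pos] at h
      exact pvDigitChar_inj n hn m hm (by simpa using h)
    · simp only [hn, hm, if_pos] at h
      cases hh : Nat.toDigits 10 (m / 10) with
      | nil => exact absurd hh (pvToDigits_ne_nil (m / 10))
      | cons c cs => rw [hh] at h; simp at h
    · simp only [hn, hm, if_pos] at h
      cases hh : Nat.toDigits 10 (n / 10) with
      | nil => exact absurd hh (pvToDigits_ne_nil (n / 10))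
      | cons c cs => rw [hh] at h; simp at h
    · simp only [if_neg hn, if_neg hm] at h
      obtain ⟨h3, h4⟩ := List.append_inj' h (by simp)
      have hd : n / 10 = m / 10 := ih (n/10) (Nat.div_lt_self (by omega) (by norm_num)) (m/10) h3
      have hmod : n % 10 = m % 10 :=
        pvDigitChar_inj (n % 10) (by omega) (m % 10) (by omega) (by simpa using h4)
      omega

theorem pvKey_inj (m n : Int) (hm : 1 ≤ m) (hn : 1 ≤ n) (h : pvKey m = pvKey n) : m = n := by
  unfold pvKey at h
  have h2 : PySem.Int.toStr m = PySem.Int.toStr n := (String.append_right_inj _).mp h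
  have h3 := congrArg String.toList h2
  rw [PySem.Int.toList_toStr, PySem.Int.toList_toStr] at h3
  unfold PySem.Int.toChars at h3
  rw [if_neg (by omega), if_neg (by omega)] at h3
  have := pvToDigits_inj m.toNat n.toNat h3
  omega

theorem pvDigitChar_digit : ∀ a < 10, PySem.Chars.isdigit (Nat.digitChar a) = true := by decide

theorem pvToDigits_all_digit (n : Nat) :
    ∀ c ∈ Nat.toDigits 10 n, PySem.Chars.isdigit c = true := by
  induction n using Nat.strong_induction_on with
  | _ n ih =>
    intro c hc
    rw [pvToDigits_rec] at hc
    by_cases h : n < 10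
    · rw [if_pos h] at hc
      simp only [List.mem_singleton] at hc
      exact hc ▸ pvDigitChar_digit n h
    · rw [if_neg h] at hc
      rcases List.mem_append.mp hc with h1 | h2
      · exact ih (n/10) (Nat.div_lt_self (by omega) (by norm_num)) c h1
      · simp only [List.mem_singleton] at h2
        exact h2 ▸ pvDigitChar_digit (n % 10) (Nat.mod_lt _ (by norm_num))

theorem pvKey_toList (n : Int) :
    (pvKey n).toList = "track_".toList ++ PySem.Int.toChars n := by
  unfold pvKey
  rw [String.toList_append, PySem.Int.toList_toStr]

theorem pvFilter_key (n : Int) (hn : 1 ≤ n) : pvIsNumberedTrack (pvKey n) = true := by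
  unfold pvIsNumberedTrack
  rw [Bool.and_eq_true]
  constructor
  · rw [show PySem.Str.startswith (pvKey n) "track_"
        = PySem.Chars.startswith (pvKey n).toList "track_".toList from rfl]
    rw [PySem.Chars.startswith_iff, pvKey_toList]
    exact List.prefix_append _ _
  · rw [show PySem.Str.strIsdigit (PySem.Str.slice (pvKey n) (some 6) none)
        = PySem.Chars.strIsdigit (PySem.Str.slice (pvKey n) (some 6) none).toList from rfl]
    rw [PySem.Str.toList_slice, PySem.Chars.slice_eq_listSlice,
      PySem.List.slice_from _ (by norm_num : (0:Int) ≤ 6), pvKey_toList]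
    have h6 : ((6:Int).toNat) = "track_".toList.length := rfl
    rw [h6, List.drop_left]
    unfold PySem.Int.toChars
    rw [if_neg (by omega)]
    unfold PySem.Chars.strIsdigit
    rw [Bool.and_eq_true]
    constructor
    · simp [pvToDigits_ne_nil]
    · rw [List.all_eq_true]
      exact fun c hc => pvToDigits_all_digit n.toNat c hc

-- dict-items lemmas: pvDictItems keeps exactly the first occurrence of each key
theorem pvItems_find? (k : String) : ∀ (l acc : List (String × List (List (String × Int)))),
    List.find? (fun p => p.1 == k)
      (l.foldl (fun acc kv => if acc.any (fun p => p.1 == kv.1) then acc else acc ++ [kv]) acc)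
    = (List.find? (fun p => p.1 == k) acc).or (List.find? (fun p => p.1 == k) l) := by
  intro l
  induction l with
  | nil => intro acc; simp
  | cons a l ih =>
    intro acc
    simp only [List.foldl_cons]
    by_cases h : acc.any (fun p => p.1 == a.1) = true
    · rw [if_pos h, ih]
      by_cases hk : a.1 = k
      · obtain ⟨p, hp, hpk⟩ := List.any_eq_true.mp h
        have hpsome : (List.find? (fun p => p.1 == k) acc).isSome := by
          rw [List.find?_isSome]
          exact ⟨p, hp, by simp [eq_of_beq hpk, hk]⟩
        obtain ⟨q, hq⟩ := Option.isSome_iff_exists.mp hpsome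
        rw [hq]
        simp
      · have : List.find? (fun p => p.1 == k) (a :: l) = List.find? (fun p => p.1 == k) l := by
          rw [List.find?_cons_of_neg]
          simp [hk]
        rw [this]
    · rw [if_neg h, ih]
      rw [show (a :: l) = [a] ++ l from rfl, List.find?_append, List.find?_append,
        Option.or_assoc]

theorem pvItems_nodup_keys : ∀ (l acc : List (String × List (List (String × Int)))),
    (acc.map Prod.fst).Nodup →
    ((l.foldl (fun acc kv => if acc.any (fun p => p.1 == kv.1) then acc else acc ++ [kv]) acc).map
      Prod.fst).Nodup := by
  intro l
  induction l with
  | nil => intro acc h; simpa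
  | cons a l ih =>
    intro acc h
    simp only [List.foldl_cons]
    by_cases hc : acc.any (fun p => p.1 == a.1) = true
    · rw [if_pos hc]; exact ih acc h
    · rw [if_neg hc]
      apply ih
      rw [List.map_append, List.map_singleton]
      refine List.Nodup.append h (List.nodup_singleton _) ?_
      intro x hx hxs
      simp only [List.mem_singleton] at hxs
      obtain ⟨p, hp, hpx⟩ := List.mem_map.mp hx
      exact hc (List.any_eq_true.mpr ⟨p, hp, by simp [hpx, hxs]⟩)

theorem pvItems_subset : ∀ (l acc : List (String × List (List (String × Int)))) (x : String × List (List (String × Int))),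
    x ∈ l.foldl (fun acc kv => if acc.any (fun p => p.1 == kv.1) then acc else acc ++ [kv]) acc →
    x ∈ acc ∨ x ∈ l := by
  intro l
  induction l with
  | nil => intro acc x hx; exact Or.inl hx
  | cons a l ih =>
    intro acc x hx
    simp only [List.foldl_cons] at hx
    by_cases hc : acc.any (fun p => p.1 == a.1) = true
    · rw [if_pos hc] at hx
      rcases ih acc x hx with h | h
      · exact Or.inl h
      · exact Or.inr (List.mem_cons_of_mem a h)
    · rw [if_neg hc] at hx
      rcases ih (acc ++ [a]) x hx with h | h
      · rcases List.mem_append.mp h with h | h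
        · exact Or.inl h
        · simp only [List.mem_singleton] at h
          exact Or.inr (h ▸ List.mem_cons_self)
      · exact Or.inr (List.mem_cons_of_mem a h)

theorem pvGoodItems (td : List (String × List (List (String × Int)))) (label : List (String × Int))
    (hW : pvW td label) :
    ∀ kv ∈ pvDictItems td, pvIsNumberedTrack kv.1 = true → ∀ lab ∈ kv.2, pvGoodLabel lab := by
  intro kv hkv
  rcases pvItems_subset td [] kv hkv with h | h
  · simp at h
  · exact hW.2 kv h

-- B's any() equals the pure any under goodness
theorem pvClash_some (label : List (String × Int)) (ls : List (List (String × Int)))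
    (hl : pvGoodLabel label) (hall : ∀ l ∈ ls, pvGoodLabel l) : ∀ acc : Bool,
    ls.foldlM (fun acc l => if acc then some true else pv_check_label_overlap? label l) acc
      = some (acc || ls.any (fun l => pvOv label l)) := by
  induction ls with
  | nil => intro acc; simp [List.foldlM]
  | cons l ls ih =>
    intro acc
    simp only [List.foldlM_cons]
    cases acc with
    | true =>
      simp only [if_pos trivial, Option.bind_eq_bind, Option.bind_some]
      rw [ih (fun x hx => hall x (by simp [hx])) true]
      simp
    | false =>
      simp only [Bool.false_eq_true, reduceIte]
      rw [pvOv_some label l hl (hall l (by simp))]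
      simp only [Option.bind_eq_bind, Option.bind_some]
      rw [ih (fun x hx => hall x (by simp [hx])) (pvOv label l)]
      cases h : pvOv label l <;> simp [h]

theorem pvBlockedAux (label : List (String × Int)) (hl : pvGoodLabel label) :
    ∀ (L : List (String × List (List (String × Int)))) (acc : PySem.Set String),
    (∀ kv ∈ L, pvIsNumberedTrack kv.1 = true → ∀ lab ∈ kv.2, pvGoodLabel lab) →
    (L.foldlM (fun s kv =>
      if pvIsNumberedTrack kv.1 then
        match pvClash? label kv.2 with
        | none => none
        | some b => some (if b then PySem.Set.add s kv.1 else s)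
      else some s) acc)
    = some (L.foldl (fun s kv =>
        if pvIsNumberedTrack kv.1 && kv.2.any (fun l => pvOv label l)
        then PySem.Set.add s kv.1 else s) acc) := by
  intro L
  induction L with
  | nil => intro acc _; simp [List.foldlM]
  | cons kv L ih =>
    intro acc hgood
    simp only [List.foldlM_cons, List.foldl_cons]
    by_cases hf : pvIsNumberedTrack kv.1 = true
    · rw [if_pos hf]
      have hclash : pvClash? label kv.2 = some (kv.2.any (fun l => pvOv label l)) := by
        unfold pvClash?
        rw [pvClash_some label kv.2 hl (hgood kv (by simp) hf) false]
        simp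
      rw [hclash]
      simp only [hf, Bool.true_and, Option.bind_eq_bind, Option.bind_some]
      exact ih _ (fun x hx => hgood x (by simp [hx]))
    · rw [if_neg hf]
      have hf' : (pvIsNumberedTrack kv.1 && kv.2.any (fun l => pvOv label l)) = false := by
        simp only [Bool.and_eq_false_iff]
        exact Or.inl (by simpa using hf)
      rw [hf']
      simp only [Bool.false_eq_true, if_false, Option.bind_eq_bind, Option.bind_some]
      exact ih _ (fun x hx => hgood x (by simp [hx]))

theorem pvBlocked_some (td : List (String × List (List (String × Int)))) (label : List (String × Int))
    (hW : pvW td label) : pvBlockedKeys? td label = some (pvBlockedPure td label) := by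
  unfold pvBlockedKeys? pvBlockedPure
  exact pvBlockedAux label hW.1 (pvDictItems td) PySem.Set.empty (pvGoodItems td label hW)

-- membership and nodup of the blocked-key fold
theorem pvFoldMemKey (p : String × List (List (String × Int)) → Bool) :
    ∀ (l : List (String × List (List (String × Int)))) (acc : List String) (x : String),
    x ∈ l.foldl (fun s kv => if p kv then PySem.Set.add s kv.1 else s) acc ↔
      x ∈ acc ∨ ∃ kv ∈ l, p kv = true ∧ kv.1 = x := by
  intro l
  induction l with
  | nil => intro acc x; simp
  | cons a l ih =>
    intro acc x
    simp only [List.foldl_cons]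
    by_cases h : p a = true
    · rw [if_pos h, ih]
      simp only [PySem.Set.mem_add, List.mem_cons]
      constructor
      · rintro ((hx | rfl) | ⟨kv, hkv, hp, hk⟩)
        · exact Or.inl hx
        · exact Or.inr ⟨a, Or.inl rfl, h, rfl⟩
        · exact Or.inr ⟨kv, Or.inr hkv, hp, hk⟩
      · rintro (hx | ⟨kv, (rfl | hkv), hp, hk⟩)
        · exact Or.inl (Or.inl hx)
        · exact Or.inl (Or.inr hk.symm)
        · exact Or.inr ⟨kv, hkv, hp, hk⟩
    · rw [if_neg h, ih]
      constructor
      · rintro (hx | ⟨kv, hkv, hp, hk⟩)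
        · exact Or.inl hx
        · exact Or.inr ⟨kv, List.mem_cons_of_mem a hkv, hp, hk⟩
      · rintro (hx | ⟨kv, hkv, hp, hk⟩)
        · exact Or.inl hx
        · rcases List.mem_cons.mp hkv with rfl | hkv
          · exact absurd hp h
          · exact Or.inr ⟨kv, hkv, hp, hk⟩

theorem pvFoldNodupKey (p : String × List (List (String × Int)) → Bool) :
    ∀ (l : List (String × List (List (String × Int)))) (acc : List String), acc.Nodup →
    (l.foldl (fun s kv => if p kv then PySem.Set.add s kv.1 else s) acc).Nodup := by
  intro l
  induction l with
  | nil => intro acc h; simpa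
  | cons a l ih =>
    intro acc h
    simp only [List.foldl_cons]
    by_cases hp : p a = true
    · rw [if_pos hp]; exact ih _ (PySem.Set.nodup_add acc a.1 h)
    · rw [if_neg hp]; exact ih _ h

theorem pvNodup_blockedPure (td : List (String × List (List (String × Int)))) (label : List (String × Int)) :
    (pvBlockedPure td label).Nodup := by
  unfold pvBlockedPure
  exact pvFoldNodupKey _ _ _ (by simp [PySem.Set.empty])

-- get? over the raw list equals get? over the dedup'd items
theorem pvGet?_items (td : List (String × List (List (String × Int)))) (k : String) :
    (PySem.Dict.mk (pvDictItems td)).get? k = (PySem.Dict.mk td).get? k := by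
  simp only [PySem.Dict.get?]
  unfold pvDictItems
  rw [pvItems_find? k td []]
  simp

-- the central fact: for n ≥ 1, pvKey n is blocked iff A's per-track test fires
theorem pvContains_blocked (td : List (String × List (List (String × Int)))) (label : List (String × Int))
    (n : Int) (hn : 1 ≤ n) :
    PySem.Set.contains (pvBlockedPure td label) (pvKey n) = pvStep td label n := by
  have hmem : pvKey n ∈ pvBlockedPure td label ↔ pvStep td label n = true := by
    unfold pvBlockedPure
    rw [pvFoldMemKey]
    simp only [PySem.Set.empty, List.not_mem_nil, false_or]
    constructor
    · rintro ⟨kv, hkv, hp, hk⟩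
      have hnd : (PySem.Dict.mk (pvDictItems td)).keys.Nodup := by
        simp only [PySem.Dict.keys]
        exact pvItems_nodup_keys td [] (by simp)
      have hget : (PySem.Dict.mk (pvDictItems td)).get? kv.1 = some kv.2 :=
        PySem.Dict.get?_of_mem_items _ (by exact hkv) hnd
      rw [hk, pvGet?_items] at hget
      unfold pvStep
      rw [PySem.Dict.getD_eq_get?_getD, hget]
      simp only [Option.getD_some]
      rw [Bool.and_eq_true] at hp
      exact hp.2
    · intro hstep
      unfold pvStep at hstep
      cases hg : (PySem.Dict.mk td).get? (pvKey n) with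
      | none =>
        rw [PySem.Dict.getD_eq_get?_getD, hg] at hstep
        simp at hstep
      | some v =>
        rw [PySem.Dict.getD_eq_get?_getD, hg] at hstep
        simp only [Option.getD_some] at hstep
        have hg' : (PySem.Dict.mk (pvDictItems td)).get? (pvKey n) = some v := by
          rw [pvGet?_items]; exact hg
        have hmem' : (pvKey n, v) ∈ pvDictItems td :=
          PySem.Dict.mem_items_of_get?_eq_some _ hg'
        exact ⟨(pvKey n, v), hmem', by
          rw [Bool.and_eq_true]
          exact ⟨pvFilter_key n hn, hstep⟩, rfl⟩
  cases hs : pvStep td label n with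
  | true =>
    have := hmem.mpr hs
    simpa [PySem.Set.contains_iff] using this
  | false =>
    rw [Bool.eq_false_iff]
    intro hcon
    have := hmem.mp ((PySem.Set.contains_iff _ _).mp hcon)
    rw [this] at hs
    exact absurd hs (by simp)

-- A raises only when it examines a bad label; under pvW each step evaluates cleanly
theorem pvGood_of_get? (td : List (String × List (List (String × Int)))) (label : List (String × Int))
    (hW : pvW td label) (n : Int) (hn : 1 ≤ n) (labs : List (List (String × Int)))
    (h : (PySem.Dict.mk td).get? (pvKey n) = some labs) :
    ∀ lab ∈ labs, pvGoodLabel lab := by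
  simp only [PySem.Dict.get?, Option.map_eq_some_iff] at h
  obtain ⟨pr, hfind, hsnd⟩ := h
  have hmem := List.mem_of_find?_eq_some hfind
  have hbeq := List.find?_some hfind
  have hk : pr.1 = pvKey n := by simpa using hbeq
  intro lab hl
  exact hW.2 pr hmem (hk ▸ pvFilter_key n hn) lab (hsnd ▸ hl)

theorem pvAnyA_some (label : List (String × Int)) (ls : List (List (String × Int)))
    (hl : pvGoodLabel label) (hall : ∀ l ∈ ls, pvGoodLabel l) :
    pvAnyOverlapA? label ls = some (ls.any (fun l => pvOv label l)) := by
  induction ls with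
  | nil => simp [pvAnyOverlapA?]
  | cons l ls ih =>
    simp only [pvAnyOverlapA?]
    rw [pvOv_some label l hl (hall l (by simp))]
    cases h : pvOv label l with
    | true => simp [h]
    | false => simp [h, ih (fun x hx => hall x (by simp [hx]))]

theorem pvStep_some (td : List (String × List (List (String × Int)))) (label : List (String × Int))
    (hW : pvW td label) (n : Int) (hn : 1 ≤ n) :
    (match (PySem.Dict.mk td).get? ("track_" ++ PySem.Int.toStr n) with
     | none => some false
     | some labs => pvAnyOverlapA? label labs) = some (pvStep td label n) := by
  cases hg : (PySem.Dict.mk td).get? ("track_" ++ PySem.Int.toStr n) with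
  | none => simp [pvStep, pvKey, PySem.Dict.getD, hg]
  | some labs =>
    simp only [pvStep, pvKey, PySem.Dict.getD, hg, Option.getD_some]
    exact pvAnyA_some label labs hW.1 (pvGood_of_get? td label hW n hn labs hg)

-- a free track exists among track_1 .. track_{len+1}
theorem pvKeyMem_of_step (td : List (String × List (List (String × Int)))) (label : List (String × Int))
    (n : Int) (h : pvStep td label n = true) : pvKey n ∈ td.map Prod.fst := by
  unfold pvStep at h
  cases hg : (PySem.Dict.mk td).get? (pvKey n) with
  | none => rw [PySem.Dict.getD_eq_get?_getD, hg] at h; simp at h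
  | some labs =>
    simp only [PySem.Dict.get?, Option.map_eq_some_iff] at hg
    obtain ⟨pr, hfind, hsnd⟩ := hg
    have hmem := List.mem_of_find?_eq_some hfind
    have hbeq := List.find?_some hfind
    have : pr.1 = pvKey n := by simpa using hbeq
    exact this ▸ List.mem_map_of_mem hmem

theorem pvFree_exists (td : List (String × List (List (String × Int)))) (label : List (String × Int)) :
    ∃ m : Int, 1 ≤ m ∧ m ≤ (td.length : Int) + 1 ∧ pvStep td label m = false := by
  by_contra hc
  push Not at hc
  have hall : ∀ m : Int, 1 ≤ m → m ≤ (td.length : Int) + 1 → pvStep td label m = true := by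
    intro m h1 h2
    have := hc m h1 h2
    cases h : pvStep td label m
    · exact absurd h this
    · rfl
  have hmaps : ∀ m ∈ Finset.Icc (1 : Int) ((td.length : Int) + 1),
      pvKey m ∈ (td.map Prod.fst).toFinset := by
    intro m hmem
    rw [Finset.mem_Icc] at hmem
    rw [List.mem_toFinset]
    exact pvKeyMem_of_step td label m (hall m hmem.1 hmem.2)
  have hinj : Set.InjOn pvKey (Finset.Icc (1 : Int) ((td.length : Int) + 1)) := by
    intro x hx y hy hxy
    simp only [Finset.coe_Icc, Set.mem_Icc] at hx hy
    exact pvKey_inj x y hx.1 hy.1 hxy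
  have hcard := Finset.card_le_card_of_injOn pvKey hmaps hinj
  rw [Int.card_Icc] at hcard
  have h1 : ((td.length : Int) + 1 + 1 - 1).toNat = td.length + 1 := by omega
  have h2 : (td.map Prod.fst).toFinset.card ≤ (td.map Prod.fst).length :=
    List.toFinset_card_le _
  simp only [h1, List.length_map] at hcard h2
  omega

-- A's lazy loop equals B's scan over the blocked-key set
theorem pvLoop_eq_scan (td : List (String × List (List (String × Int)))) (label : List (String × Int))
    (hW : pvW td label) (blocked : PySem.Set String) :
    ∀ (fA fB : Nat) (n m : Int), 1 ≤ n → n ≤ m → m < n + (fA : Int) → m < n + (fB : Int) →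
      pvStep td label m = false →
      (∀ k, n ≤ k → k ≤ m → PySem.Set.contains blocked (pvKey k) = pvStep td label k) →
      pvLoopA td label fA n = some (pvScanB blocked fB n) := by
  intro fA
  induction fA with
  | zero => intro fB n m h0 h1 h2; omega
  | succ fA ih =>
    intro fB n m h0 h1 h2 h3 hm hk
    cases fB with
    | zero => exfalso; push_cast at h3; omega
    | succ fB =>
      simp only [pvLoopA, pvScanB]
      rw [pvStep_some td label hW n h0]
      have hkn := hk n le_rfl h1
      unfold pvKey at hkn
      rw [hkn]
      cases hP : pvStep td label n with
      | false => simp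
      | true =>
        have hne : n ≠ m := fun he => by rw [he, hm] at hP; exact Bool.false_ne_true hP
        simp only
        exact ih fB (n + 1) m (by omega) (by omega) (by omega) (by omega) hm
          (fun k hk1 hk2 => hk k (by omega) hk2)

-- the second Pre_ disjunct: every numbered track is empty, so both return 1
theorem pvEmptyAux (label : List (String × Int)) :
    ∀ (l : List (String × List (List (String × Int)))) (acc : PySem.Set String),
    (∀ kv ∈ l, pvIsNumberedTrack kv.1 = true → kv.2 = []) →
    (l.foldlM (fun s kv =>
      if pvIsNumberedTrack kv.1 then
        match pvClash? label kv.2 with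
        | none => none
        | some b => some (if b then PySem.Set.add s kv.1 else s)
      else some s) acc) = some acc := by
  intro l
  induction l with
  | nil => intro acc h; simp [List.foldlM]
  | cons a l ih =>
    intro acc h
    simp only [List.foldlM_cons]
    by_cases hf : pvIsNumberedTrack a.1 = true
    · rw [if_pos hf, h a (by simp) hf]
      have h0 : pvClash? label ([] : List (List (String × Int))) = some false := rfl
      rw [h0]
      simp only [Bool.false_eq_true, if_false, Option.bind_eq_bind, Option.bind_some]
      exact ih acc (fun kv hkv => h kv (by simp [hkv]))
    · rw [if_neg hf]
      simp only [Option.bind_eq_bind, Option.bind_some]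
      exact ih acc (fun kv hkv => h kv (by simp [hkv]))

theorem pvEmptyCase (td : List (String × List (List (String × Int)))) (label : List (String × Int))
    (h : ∀ kv ∈ td, pvIsNumberedTrack kv.1 = true → kv.2 = []) :
    find_lowest_available_track td label = find_lowest_available_track_alt td label := by
  have hA : find_lowest_available_track td label = 1 := by
    unfold find_lowest_available_track
    simp only [pvLoopA]
    cases hg : (PySem.Dict.mk td).get? ("track_" ++ PySem.Int.toStr 1) with
    | none => simp
    | some labs =>
      simp only [PySem.Dict.get?, Option.map_eq_some_iff] at hg
      obtain ⟨pr, hfind, hsnd⟩ := hg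
      have hmem := List.mem_of_find?_eq_some hfind
      have hbeq := List.find?_some hfind
      have hk : pr.1 = "track_" ++ PySem.Int.toStr 1 := by simpa using hbeq
      have hempty : pr.2 = [] := h pr hmem (by rw [hk]; exact pvFilter_key 1 le_rfl)
      rw [← hsnd, hempty]
      simp [pvAnyOverlapA?]
  have hB : find_lowest_available_track_alt td label = 1 := by
    unfold find_lowest_available_track_alt pvBlockedKeys?
    have hitems : ∀ kv ∈ pvDictItems td, pvIsNumberedTrack kv.1 = true → kv.2 = [] := by
      intro kv hkv
      rcases pvItems_subset td [] kv hkv with h' | h'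
      · simp at h'
      · exact h kv h'
    rw [pvEmptyAux label _ PySem.Set.empty hitems]
    simp [pvScanB, PySem.Set.contains, PySem.Set.empty]
  rw [hA, hB]

-- ===== VERDICT (by name: the statement is the Claim_ definition above) =====
theorem find_lowest_available_track_spec : Claim_equal_find_lowest_available_track := by
  intro td label _hDom hPre
  unfold Spec_find_lowest_available_track
  rcases hPre with hW | hEmpty
  · have hW' : pvW td label := hW
    have hb := pvBlocked_some td label hW'
    set B := pvBlockedPure td label with hBdef
    have hcont : ∀ k : Int, 1 ≤ k → PySem.Set.contains B (pvKey k) = pvStep td label k :=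
      fun k hk => pvContains_blocked td label k hk
    obtain ⟨m0, hm01, hm02, hm03⟩ := pvFree_exists td label
    have hS : ((Finset.Icc (1 : Int) ((td.length : Int) + 1)).filter
        (fun k => pvStep td label k = false)).Nonempty := by
      exact ⟨m0, by simp [Finset.mem_filter, Finset.mem_Icc, hm01, hm02, hm03]⟩
    set S := (Finset.Icc (1 : Int) ((td.length : Int) + 1)).filter
        (fun k => pvStep td label k = false) with hSdef
    set m := S.min' hS with hmdef
    have hmS : m ∈ S := S.min'_mem hS
    rw [hSdef, Finset.mem_filter, Finset.mem_Icc] at hmS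
    obtain ⟨⟨hm1, hm2⟩, hm3⟩ := hmS
    have hblocked_lower : ∀ k : Int, 1 ≤ k → k < m → pvKey k ∈ B := by
      intro k h1 h2
      have hkS : k ∉ S := by
        intro hkS
        have := S.min'_le k hkS
        omega
      rw [hSdef, Finset.mem_filter, Finset.mem_Icc] at hkS
      push Not at hkS
      have hstep : pvStep td label k = true := by
        cases hP : pvStep td label k with
        | true => rfl
        | false => exact absurd hP (hkS ⟨h1, by omega⟩)
      have := hcont k h1
      rw [hstep] at this
      exact (PySem.Set.contains_iff _ _).mp this
    have hlenB : m - 1 ≤ (B.length : Int) := by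
      have hmaps : ∀ k ∈ Finset.Icc (1 : Int) (m - 1), pvKey k ∈ B.toFinset := by
        intro k hk
        rw [Finset.mem_Icc] at hk
        rw [List.mem_toFinset]
        exact hblocked_lower k hk.1 (by omega)
      have hinj : Set.InjOn pvKey (Finset.Icc (1 : Int) (m - 1)) := by
        intro x hx y hy hxy
        simp only [Finset.coe_Icc, Set.mem_Icc] at hx hy
        exact pvKey_inj x y hx.1 hy.1 hxy
      have hcard := Finset.card_le_card_of_injOn pvKey hmaps hinj
      rw [Int.card_Icc] at hcard
      have hnd : B.Nodup := hBdef ▸ pvNodup_blockedPure td label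
      have h2 : B.toFinset.card = B.length := List.toFinset_card_of_nodup hnd
      omega
    have hloop := pvLoop_eq_scan td label hW' B (td.length + 1) (B.length + 1) 1 m
      le_rfl hm1 (by push_cast; omega) (by push_cast; omega) hm3
      (fun k hk1 _ => hcont k hk1)
    unfold find_lowest_available_track find_lowest_available_track_alt
    rw [hb, hloop]
    simp
  · exact pvEmptyCase td label hEmpty
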